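-- pv_equiv track=rewrite | github.com/pareeknikhil/Natural-Language-Processing | Bigram Maximum Entropy Markov model (MEMM) to do Part of Speech Tagging/nxp170014_memm.py | remove_rare_features
-- ===== SOURCE A (Python) =====
-- def remove_rare_features(features, n) :
-- 	feature_dict = {}
-- 	rare_features = set()
-- 	non_rare_features = set()
-- 	for sentence in features :
-- 		for word_features in sentence :
-- 			for feature in word_features :
-- 				if(feature_dict.get(feature) != None) :
-- 					feature_dict[feature] = feature_dict[feature] + 1
-- 				else :
-- 					feature_dict[feature] = 1
-- 	for (word,count) in feature_dict.items() :
-- 		if(count<n) :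
-- 			rare_features.add(word)
-- 		else :
-- 			non_rare_features.add(word)
--
-- 	for sentence_index,sentence in enumerate(features) :
-- 		for word_index,word_features in enumerate(sentence) :
-- 			features[sentence_index][word_index] = [ elem for elem in features[sentence_index][word_index] if elem not in rare_features]
-- 	return features, non_rare_features
-- ===== SOURCE B (Python) =====
-- def remove_rare_features(features, n):
--     flat = [f for sentence in features for word_features in sentence for f in word_features]
--     rare = set()
--     prev = None
--     cnt = 0
--     for f in sorted(flat):
--         if f == prev:
--             cnt += 1
--         else:
--             if prev is not None and cnt < n:
--                 rare.add(prev)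
--             prev = f
--             cnt = 1
--     if prev is not None and cnt < n:
--         rare.add(prev)
--     for i, sentence in enumerate(features):
--         for j, word_features in enumerate(sentence):
--             features[i][j] = [f for f in word_features if f not in rare]
--     non_rare_features = {f for f in flat if f not in rare}
--     return features, non_rare_features
-- ===== Notes on version B (the rewrite author's own statement) =====
-- stated objective: alternative
-- what changed: B replaces A's hash-dict counting plus a classification pass with sort-then-scan: it flattens all features, sorts the flat list, detects rare features by measuring runs of equal elements in one linear scan, then filters each word's list and derives non_rare_features from the flat list; A's feature_dict and its items() pass disappear.
import Mathlib
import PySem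

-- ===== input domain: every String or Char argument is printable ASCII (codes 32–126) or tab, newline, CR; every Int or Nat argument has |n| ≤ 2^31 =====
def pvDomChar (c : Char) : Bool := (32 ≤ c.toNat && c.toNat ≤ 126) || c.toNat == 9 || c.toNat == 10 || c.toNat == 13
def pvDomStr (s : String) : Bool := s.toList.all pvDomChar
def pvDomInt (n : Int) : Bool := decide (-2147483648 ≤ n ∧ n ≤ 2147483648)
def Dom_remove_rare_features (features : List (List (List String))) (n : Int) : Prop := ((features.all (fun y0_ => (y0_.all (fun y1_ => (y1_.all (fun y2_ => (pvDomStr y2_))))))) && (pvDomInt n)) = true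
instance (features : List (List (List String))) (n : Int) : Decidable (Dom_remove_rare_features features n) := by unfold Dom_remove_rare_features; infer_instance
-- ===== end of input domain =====

-- B replaces A's dict counting + classification pass by sort-then-scan over the flattened
-- feature list (rare = runs shorter than n); same return value, a different algorithm.
-- Both Pythons mutate `features` in place; the equivalence proved here is about the return value
-- (which aliases the mutated lists identically in both).

-- ===== PORT A =====
def remove_rare_features (features : List (List (List String))) (n : Int) : List (List (List String)) × List String :=
  -- feature_dict = {}; triple loop counting (the then-branch reads feature_dict[feature], the matched `some c`)
  let feature_dict : PySem.Dict String Int :=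
    features.foldl (fun d sentence =>
      sentence.foldl (fun d word_features =>
        word_features.foldl (fun d feature =>
          match d.get? feature with
          | some c => d.insert feature (c + 1)
          | none => d.insert feature 1) d) d) PySem.Dict.empty
  -- for (word,count) in feature_dict.items(): classify into rare / non_rare
  let rn : PySem.Set String × PySem.Set String :=
    feature_dict.items.foldl (fun rn wc =>
      if wc.2 < n then (PySem.Set.add rn.1 wc.1, rn.2) else (rn.1, PySem.Set.add rn.2 wc.1))
      (PySem.Set.empty, PySem.Set.empty)
  -- the enumerate loop assigns features[i][j] = [elem for elem in features[i][j] if elem not in rare_features]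
  -- at every index in order: exactly an elementwise map over the nested lists
  let feats := features.map (fun sentence => sentence.map (fun word_features =>
    word_features.filter (fun elem => !(PySem.Set.contains rn.1 elem))))
  (feats, rn.2)

-- ===== PORT B =====
def remove_rare_features_alt (features : List (List (List String))) (n : Int) : List (List (List String)) × List String :=
  -- flat = [f for sentence in features for word_features in sentence for f in word_features]
  let flat : List String :=
    features.flatMap (fun sentence => sentence.flatMap (fun word_features => word_features))
  -- for f in sorted(flat): run-length scan with state (rare, prev, cnt); prev=None ↦ none
  let st : PySem.Set String × Option String × Int :=
    (PySem.List.sorted flat (fun x => x) false).foldl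
      (fun acc f =>
        if some f == acc.2.1 then (acc.1, acc.2.1, acc.2.2 + 1)
        else
          ((match acc.2.1 with
            | some p => if acc.2.2 < n then PySem.Set.add acc.1 p else acc.1
            | none => acc.1), some f, 1))
      (PySem.Set.empty, none, 0)
  -- trailing flush: if prev is not None and cnt < n: rare.add(prev)
  let rare : PySem.Set String :=
    match st.2.1 with
    | some p => if st.2.2 < n then PySem.Set.add st.1 p else st.1
    | none => st.1
  -- features[i][j] = [f for f in word_features if f not in rare]
  let feats := features.map (fun sentence => sentence.map (fun word_features =>
    word_features.filter (fun f => !(PySem.Set.contains rare f))))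
  -- non_rare_features = {f for f in flat if f not in rare}
  let non_rare : PySem.Set String :=
    PySem.Set.ofList (flat.filter (fun f => !(PySem.Set.contains rare f)))
  (feats, non_rare)

-- ===== PRECONDITION & SPEC =====
def Spec_remove_rare_features (features : List (List (List String))) (n : Int) (out : List (List (List String)) × List String) : Prop := out = remove_rare_features_alt features n
instance (features : List (List (List String))) (n : Int) (out : List (List (List String)) × List String) : Decidable (Spec_remove_rare_features features n out) := by unfold Spec_remove_rare_features; infer_instance

-- ===== CLAIM =====
def Claim_equal_remove_rare_features : Prop := ∀ (features : List (List (List String))) (n : Int), Dom_remove_rare_features features n → Spec_remove_rare_features features n (remove_rare_features features n)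

-- ===== LEMMAS AND PROOFS =====

-- the features of `features`, flattened in traversal order of the triple loop
def pvFlat (features : List (List (List String))) : List String :=
  (features.map List.flatten).flatten

-- a triple nested foldl is the foldl over the flattened list
theorem pv_triple_foldl {β : Type} (g : β → String → β) :
    ∀ (features : List (List (List String))) (i : β),
      features.foldl (fun d sentence =>
        sentence.foldl (fun d word_features => word_features.foldl g d) d) i
      = (pvFlat features).foldl g i := by
  intro features
  induction features with
  | nil => intro i; rfl
  | cons s rest ih =>
      intro i
      simp only [List.foldl_cons]
      rw [ih, ← List.foldl_flatten]
      simp [pvFlat, List.foldl_append]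

-- A's counting body equals the getD form
theorem pv_abody_eq (d : PySem.Dict String Int) (f : String) :
    (match d.get? f with
     | some c => d.insert f (c + 1)
     | none => d.insert f 1) = d.insert f (d.getD f 0 + 1) := by
  cases h : d.get? f <;> simp [PySem.Dict.getD, h]

theorem pv_flat_eq (features : List (List (List String))) :
    features.flatMap (fun sentence => sentence.flatMap (fun word_features => word_features))
      = pvFlat features := by
  simp [pvFlat, List.flatMap_def]

-- folding Set.add over fresh distinct keys, split by a threshold on c   (A's classification loop)
theorem pv_pair_fold (c : String → Int) (n : Int) :
    ∀ (ks : List String) (r s : PySem.Set String), ks.Nodup →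
      (∀ x ∈ ks, x ∉ r) → (∀ x ∈ ks, x ∉ s) →
      ks.foldl (fun rn k => if c k < n then (PySem.Set.add rn.1 k, rn.2)
                            else (rn.1, PySem.Set.add rn.2 k)) (r, s)
      = (r ++ ks.filter (fun k => decide (c k < n)),
         s ++ ks.filter (fun k => decide (n ≤ c k))) := by
  intro ks
  induction ks with
  | nil => intro r s _ _ _; simp
  | cons k ks ih =>
      intro r s hnd hr hs
      have hk_r : k ∉ r := hr k (by simp)
      have hk_s : k ∉ s := hs k (by simp)
      have hnd' := (List.nodup_cons.mp hnd)
      by_cases hc : c k < n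
      · have hadd : PySem.Set.add r k = r ++ [k] := by
          simp [PySem.Set.add, PySem.Set.contains, List.contains_eq_mem, hk_r]
        simp only [List.foldl_cons, if_pos hc, hadd]
        rw [ih (r ++ [k]) s hnd'.2
            (fun x hx => by
              simp only [List.mem_append, List.mem_singleton]
              rintro (h | rfl)
              · exact hr x (by simp [hx]) h
              · exact hnd'.1 hx)
            (fun x hx => hs x (by simp [hx]))]
        simp [hc]
      · have hadd : PySem.Set.add s k = s ++ [k] := by
          simp [PySem.Set.add, PySem.Set.contains, List.contains_eq_mem, hk_s]
        simp only [List.foldl_cons, if_neg hc, hadd]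
        rw [ih r (s ++ [k]) hnd'.2
            (fun x hx => hr x (by simp [hx]))
            (fun x hx => by
              simp only [List.mem_append, List.mem_singleton]
              rintro (h | rfl)
              · exact hs x (by simp [hx]) h
              · exact hnd'.1 hx)]
        simp [hc, List.filter_cons]

-- filtering commutes with the dedup performed by folding Set.add
theorem pv_foldl_add_filter (p : String → Bool) :
    ∀ (xs : List String) (s : PySem.Set String),
      (xs.filter p).foldl PySem.Set.add (s.filter p)
      = (xs.foldl PySem.Set.add s).filter p := by
  intro xs
  induction xs with
  | nil => intro s; rfl
  | cons x xs ih =>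
      intro s
      by_cases hp : p x
      · have hadd : PySem.Set.add (List.filter p s) x = List.filter p (PySem.Set.add s x) := by
          simp only [PySem.Set.add, PySem.Set.contains, List.contains_eq_mem]
          by_cases hm : x ∈ s
          · simp [hm, hp, List.mem_filter]
          · simp [hm, hp, List.mem_filter, List.filter_append]
        simp only [List.filter_cons, hp, if_pos, List.foldl_cons, hadd]
        exact ih (PySem.Set.add s x)
      · have hfil : List.filter p (PySem.Set.add s x) = List.filter p s := by
          simp only [PySem.Set.add, PySem.Set.contains, List.contains_eq_mem]
          by_cases hm : x ∈ s
          · simp [hm]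
          · simp [hm, List.filter_append, hp]
        simp only [List.filter_cons, hp, Bool.false_eq_true, List.foldl_cons]
        rw [← hfil]
        exact ih (PySem.Set.add s x)

theorem pv_ofList_filter (p : String → Bool) (xs : List String) :
    PySem.Set.ofList (xs.filter p) = (PySem.Set.ofList xs).filter p := by
  rw [PySem.Set.ofList_eq_foldl, PySem.Set.ofList_eq_foldl]
  exact pv_foldl_add_filter p xs []

-- ---- B's run scan over a sorted list ----

-- the step of B's loop, named for the proofs
def pvStep (n : Int) (acc : PySem.Set String × Option String × Int) (f : String) :
    PySem.Set String × Option String × Int :=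
  if some f == acc.2.1 then (acc.1, acc.2.1, acc.2.2 + 1)
  else
    ((match acc.2.1 with
      | some p => if acc.2.2 < n then PySem.Set.add acc.1 p else acc.1
      | none => acc.1), some f, 1)

def pvFlush (n : Int) (st : PySem.Set String × Option String × Int) : PySem.Set String :=
  match st.2.1 with
  | some p => if st.2.2 < n then PySem.Set.add st.1 p else st.1
  | none => st.1

theorem pv_mem_add (s : PySem.Set String) (y x : String) :
    x ∈ PySem.Set.add s y ↔ x ∈ s ∨ x = y := by
  simp only [PySem.Set.add, PySem.Set.contains, List.contains_eq_mem]
  by_cases h : y ∈ s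
  · simp [h]; rintro rfl; exact h
  · simp [h]

theorem pv_count_cons_ne {x y : String} (s : List String) (h : x ≠ y) :
    (y :: s).count x = s.count x := by
  simp [Ne.symm h]

-- scanning a sorted list whose elements all dominate the open run (p, c)
theorem pv_run_scan (n : Int) :
    ∀ (s : List String), s.Pairwise (· ≤ ·) →
      ∀ (r : PySem.Set String) (p : String) (c : Int) (x : String),
        (∀ y ∈ s, p ≤ y) →
        (x ∈ pvFlush n (s.foldl (pvStep n) (r, some p, c)) ↔
          x ∈ r ∨ (x = p ∧ c + (s.count p : Int) < n) ∨
          (x ∈ s ∧ x ≠ p ∧ ((s.count x : Int) < n))) := by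
  intro s
  induction s with
  | nil =>
      intro _ r p c x _
      simp only [List.foldl_nil, pvFlush, List.count_nil]
      by_cases hc : c < n
      · simp only [if_pos hc, pv_mem_add]
        constructor
        · rintro (h | h)
          · exact Or.inl h
          · exact Or.inr (Or.inl ⟨h, by omega⟩)
        · rintro (h | ⟨rfl, _⟩ | ⟨h, _, _⟩)
          · exact Or.inl h
          · exact Or.inr rfl
          · simp at h
      · simp only [if_neg hc]
        constructor
        · exact fun h => Or.inl h
        · rintro (h | ⟨rfl, h⟩ | ⟨h, _, _⟩)
          · exact h
          · omega
          · simp at h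
  | cons y s ih =>
      intro hsorted r p c x hdom
      have hs' : s.Pairwise (· ≤ ·) := (List.pairwise_cons.mp hsorted).2
      have hydom : ∀ z ∈ s, y ≤ z := (List.pairwise_cons.mp hsorted).1
      by_cases hyp : y = p
      · subst hyp
        have hstep : pvStep n (r, some y, c) y = (r, some y, c + 1) := by
          simp [pvStep]
        simp only [List.foldl_cons, hstep]
        rw [ih hs' r y (c + 1) x hydom]
        simp only [List.count_cons_self, List.mem_cons]
        constructor
        · rintro (h | ⟨rfl, h⟩ | ⟨h, hne, hcnt⟩)
          · exact Or.inl h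
          · refine Or.inr (Or.inl ⟨rfl, by push_cast; omega⟩)
          · refine Or.inr (Or.inr ⟨Or.inr h, hne, ?_⟩)
            rw [pv_count_cons_ne s hne]; exact hcnt
        · rintro (h | ⟨rfl, h⟩ | ⟨hm, hne, hcnt⟩)
          · exact Or.inl h
          · refine Or.inr (Or.inl ⟨rfl, by push_cast at h ⊢; omega⟩)
          · rcases hm with rfl | hm
            · exact absurd rfl hne
            · refine Or.inr (Or.inr ⟨hm, hne, ?_⟩)
              rwa [pv_count_cons_ne s hne] at hcnt
      · -- y ≠ p: flush p, open a new run at y; p < y ≤ everything, so p ∉ y :: s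
        have hpy : p < y := lt_of_le_of_ne (hdom y (by simp)) (fun h => hyp h.symm)
        have hpn : p ∉ y :: s := by
          intro hm
          rcases List.mem_cons.mp hm with rfl | hm
          · exact hyp rfl
          · exact absurd (hydom p hm) (not_le.mpr hpy)
        have hstep : pvStep n (r, some p, c) y
            = ((if c < n then PySem.Set.add r p else r), some y, 1) := by
          have : (some y == some p) = false := by
            simp [hyp]
          simp [pvStep, this]
        simp only [List.foldl_cons, hstep]
        rw [ih hs' _ y 1 x hydom]
        have hmem : x ∈ (if c < n then PySem.Set.add r p else r) ↔
            x ∈ r ∨ (x = p ∧ c < n) := by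
          by_cases hc : c < n
          · simp [hc]
          · simp [hc]
        rw [hmem]
        have hcp : (y :: s).count p = 0 := List.count_eq_zero.mpr hpn
        have hcs : s.count p = 0 := List.count_eq_zero.mpr (fun h => hpn (List.mem_cons_of_mem _ h))
        constructor
        · rintro ((h | ⟨rfl, h⟩) | ⟨rfl, h⟩ | ⟨hm, hne, hcnt⟩)
          · exact Or.inl h
          · exact Or.inr (Or.inl ⟨rfl, by rw [hcp]; push_cast; omega⟩)
          · refine Or.inr (Or.inr ⟨by simp, hyp, ?_⟩)
            simp only [List.count_cons_self]
            push_cast at h ⊢; omega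
          · have hne' : x ≠ p := by
              rintro rfl
              exact hpn (List.mem_cons_of_mem _ hm)
            refine Or.inr (Or.inr ⟨List.mem_cons_of_mem _ hm, hne', ?_⟩)
            by_cases hxy : x = y
            · subst hxy
              simp only [List.count_cons_self]
              exact absurd rfl hne
            · rw [pv_count_cons_ne s hxy]; exact hcnt
        · rintro (h | ⟨rfl, h⟩ | ⟨hm, hne, hcnt⟩)
          · exact Or.inl (Or.inl h)
          · rw [hcp] at h
            exact Or.inl (Or.inr ⟨rfl, by push_cast at h; omega⟩)
          · rcases List.mem_cons.mp hm with rfl | hm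
            · refine Or.inr (Or.inl ⟨rfl, ?_⟩)
              simp only [List.count_cons_self] at hcnt
              push_cast at hcnt ⊢; omega
            · by_cases hxy : x = y
              · subst hxy
                refine Or.inr (Or.inl ⟨rfl, ?_⟩)
                simp only [List.count_cons_self] at hcnt
                push_cast at hcnt ⊢; omega
              · refine Or.inr (Or.inr ⟨hm, hxy, ?_⟩)
                rwa [pv_count_cons_ne s hxy] at hcnt

-- from a fresh start, the scan's flushed set holds exactly the rare elements
theorem pv_run_scan_none (n : Int) (s : List String) (hsorted : s.Pairwise (· ≤ ·)) (x : String) :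
    x ∈ pvFlush n (s.foldl (pvStep n) (PySem.Set.empty, none, 0)) ↔
      x ∈ s ∧ ((s.count x : Int) < n) := by
  cases s with
  | nil => simp [pvFlush, PySem.Set.empty]
  | cons y s =>
      have hs' : s.Pairwise (· ≤ ·) := (List.pairwise_cons.mp hsorted).2
      have hydom : ∀ z ∈ s, y ≤ z := (List.pairwise_cons.mp hsorted).1
      have hstep : pvStep n ((PySem.Set.empty : PySem.Set String), none, 0) y
          = (PySem.Set.empty, some y, 1) := by
        simp [pvStep]
      simp only [List.foldl_cons, hstep]
      rw [pv_run_scan n s hs' PySem.Set.empty y 1 x hydom]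
      simp only [PySem.Set.empty, List.not_mem_nil, false_or, List.mem_cons]
      constructor
      · rintro (⟨rfl, h⟩ | ⟨hm, hne, hcnt⟩)
        · exact ⟨Or.inl rfl, by simp only [List.count_cons_self]; push_cast at h ⊢; omega⟩
        · exact ⟨Or.inr hm, by rw [pv_count_cons_ne s hne]; exact hcnt⟩
      · rintro ⟨hm, hcnt⟩
        by_cases hxy : x = y
        · subst hxy
          refine Or.inl ⟨rfl, ?_⟩
          simp only [List.count_cons_self] at hcnt
          push_cast at hcnt ⊢; omega
        · rcases hm with rfl | hm
          · exact absurd rfl hxy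
          · refine Or.inr ⟨hm, hxy, ?_⟩
            rwa [pv_count_cons_ne s hxy] at hcnt

-- B's rare set as a function of the flat list
def pvRareL (n : Int) (flat : List String) : PySem.Set String :=
  pvFlush n ((PySem.List.sorted flat (fun x => x) false).foldl (pvStep n)
    (PySem.Set.empty, none, 0))

-- membership in B's rare set: exactly the flat features with count < n
theorem pv_rareL_mem (flat : List String) (n : Int) (x : String) :
    x ∈ pvRareL n flat ↔ x ∈ flat ∧ ((flat.count x : Int) < n) := by
  have hperm : (PySem.List.sorted flat (fun x => x) false).Perm flat :=
    PySem.List.sorted_perm _ _ _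
  have hsorted : (PySem.List.sorted flat (fun x => x) false).Pairwise (· ≤ ·) := by
    have := PySem.List.sorted_pairwise (xs := flat) (key := fun x => x)
    simpa using this
  unfold pvRareL
  rw [pv_run_scan_none n _ hsorted x, hperm.mem_iff, hperm.count_eq]

-- main equality of the two ports
theorem pv_main (features : List (List (List String))) (n : Int) :
    remove_rare_features features n = remove_rare_features_alt features n := by
  -- A's count dict is the Counter of the flattened features
  have hdictA :
      features.foldl (fun d sentence =>
        sentence.foldl (fun d word_features =>
          word_features.foldl (fun (d : PySem.Dict String Int) feature =>
            match d.get? feature with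
            | some c => d.insert feature (c + 1)
            | none => d.insert feature 1) d) d) PySem.Dict.empty
      = PySem.Dict.counter (pvFlat features) := by
    have hb : (fun (d : PySem.Dict String Int) feature =>
        match d.get? feature with
        | some c => d.insert feature (c + 1)
        | none => d.insert feature 1)
        = fun (d : PySem.Dict String Int) feature => d.insert feature (d.getD feature 0 + 1) :=
      funext fun d => funext fun f => pv_abody_eq d f
    rw [hb, pv_triple_foldl, PySem.Dict.foldl_insert_getD_add_one_eq_counter]
  -- B's result, phrased with the named scan helpers (definitional)
  have hBdef : remove_rare_features_alt features n
      = (features.map (fun sentence => sentence.map (fun word_features =>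
           word_features.filter (fun f => !(PySem.Set.contains
             (pvRareL n (features.flatMap (fun s => s.flatMap (fun w => w)))) f)))),
         PySem.Set.ofList ((features.flatMap (fun s => s.flatMap (fun w => w))).filter
           (fun f => !(PySem.Set.contains
             (pvRareL n (features.flatMap (fun s => s.flatMap (fun w => w)))) f)))) := rfl
  rw [hBdef]
  simp only [pv_flat_eq]
  -- A's side: unfold and evaluate the counting dict and the classification loop
  simp only [remove_rare_features]
  rw [hdictA]
  rw [PySem.Dict.items_counter, List.foldl_map]
  simp only []
  rw [pv_pair_fold (fun k => ((List.count k (pvFlat features) : Nat) : Int)) n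
      (PySem.Set.ofList (pvFlat features)) PySem.Set.empty PySem.Set.empty
      (PySem.Set.nodup_ofList _) (by simp [PySem.Set.empty]) (by simp [PySem.Set.empty])]
  simp only [PySem.Set.empty, List.nil_append]
  -- both rare sets have the same membership on elements of flat
  have hrareA : ∀ x, x ∈ (PySem.Set.ofList (pvFlat features)).filter
      (fun k => decide (((List.count k (pvFlat features) : Nat) : Int) < n)) ↔
      x ∈ pvFlat features ∧ (((pvFlat features).count x : Nat) : Int) < n := by
    intro x
    simp [List.mem_filter, PySem.Set.mem_ofList]
  have hcont : ∀ x, PySem.Set.contains ((PySem.Set.ofList (pvFlat features)).filter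
        (fun k => decide (((List.count k (pvFlat features) : Nat) : Int) < n))) x
      = PySem.Set.contains (pvRareL n (pvFlat features)) x := by
    intro x
    simp only [PySem.Set.contains, List.contains_eq_mem]
    rw [Bool.eq_iff_iff]
    simp only [decide_eq_true_eq]
    rw [hrareA x, pv_rareL_mem (pvFlat features) n x]
  refine Prod.ext ?_ ?_
  · -- filtered features agree
    apply List.map_congr_left
    intro sent hsent
    dsimp only
    apply List.map_congr_left
    intro wf hwf
    apply List.filter_congr
    intro e _
    rw [hcont e]
  · -- non_rare sets agree
    have hpred : (pvFlat features).filter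
        (fun f => !(PySem.Set.contains (pvRareL n (pvFlat features)) f))
        = (pvFlat features).filter
            (fun k => decide (n ≤ ((List.count k (pvFlat features) : Nat) : Int))) := by
      apply List.filter_congr
      intro e he
      rw [Bool.eq_iff_iff]
      simp only [PySem.Set.contains, List.contains_eq_mem, Bool.not_eq_true',
        decide_eq_false_iff_not, decide_eq_true_eq]
      constructor
      · intro h
        by_contra hn
        exact h ((pv_rareL_mem (pvFlat features) n e).mpr ⟨he, by omega⟩)
      · intro h hc
        have hm := (pv_rareL_mem (pvFlat features) n e).mp hc
        omega
    rw [hpred, pv_ofList_filter]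

-- ===== VERDICT =====
theorem remove_rare_features_spec : Claim_equal_remove_rare_features := by
  intro features n _
  unfold Spec_remove_rare_features
  exact pv_main features n
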